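-- pv_equiv track=rewrite | github.com/mrazeem3470/Edabit-practice-questions | Algebra/Easy/edabit_easy_algebra_9.py | amplify
-- ===== SOURCE A (Python) =====
-- def amplify(n):
--     store = []
--     for i in range(1,n+1):
--         if i % 4 == 0:
--             store.append(i * 10)
--         else:
--             store.append(i)
--     return store
-- ===== SOURCE B (Python) =====
-- def amplify(n):
--     store = list(range(1, n + 1))
--     for j in range(3, n, 4):
--         store[j] *= 10
--     return store
-- ===== Notes on version B (the rewrite author's own statement) =====
-- stated objective: alternative
-- what changed: B materializes the whole base list 1..n at once and then does a second strided pass that multiplies only the positions holding multiples of 4 (indices 3,7,11,...), instead of A's single pass testing i % 4 == 0 on every element.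
import Mathlib
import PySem

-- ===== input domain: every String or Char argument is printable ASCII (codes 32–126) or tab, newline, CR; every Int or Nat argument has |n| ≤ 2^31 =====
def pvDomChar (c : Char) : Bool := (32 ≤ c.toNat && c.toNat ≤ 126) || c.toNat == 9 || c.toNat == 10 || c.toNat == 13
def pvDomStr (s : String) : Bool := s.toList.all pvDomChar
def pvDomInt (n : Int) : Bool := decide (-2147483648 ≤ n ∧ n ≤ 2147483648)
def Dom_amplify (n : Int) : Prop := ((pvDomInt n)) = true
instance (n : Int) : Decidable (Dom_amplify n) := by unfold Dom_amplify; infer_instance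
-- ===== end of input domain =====

-- B replaces A's per-element `i % 4 == 0` test by materializing 1..n and a second strided
-- pass over indices 3, 7, 11, … (objective: alternative decomposition, same cost).

-- ===== PORT A =====
-- store = []; for i in range(1, n+1): append i*10 if i % 4 == 0 else i
def amplify (n : Int) : List Int :=
  (PySem.List.pyRange 1 (n + 1) 1).foldl
    (fun store i => if PySem.Int.mod i 4 = 0 then store ++ [i * 10] else store ++ [i]) []

-- ===== PORT B =====
-- store = list(range(1, n+1)); for j in range(3, n, 4): store[j] *= 10
-- every j produced by range(3, n, 4) is nonnegative and < len(store), so Python's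
-- `store[j] *= 10` is exactly `List.modify j.toNat (· * 10)` here (no negative indexing arises).
def amplify_alt (n : Int) : List Int :=
  let store := PySem.List.pyRange 1 (n + 1) 1
  (PySem.List.pyRange 3 n 4).foldl (fun st j => st.modify j.toNat (· * 10)) store

-- ===== PRECONDITION & SPEC =====
def Spec_amplify (n : Int) (out : List Int) : Prop := out = amplify_alt n
instance (n : Int) (out : List Int) : Decidable (Spec_amplify n out) := by unfold Spec_amplify; infer_instance

-- ===== CLAIM (what is proved, stated in full; the proofs are below) =====
def Claim_equal_amplify : Prop := ∀ (n : Int), Dom_amplify n → Spec_amplify n (amplify n)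

-- ===== LEMMAS AND PROOFS =====

-- A's append-loop over any list is a map.
theorem foldl_amp_append (l : List Int) (acc : List Int) :
    l.foldl (fun store i => if PySem.Int.mod i 4 = 0 then store ++ [i * 10] else store ++ [i]) acc
      = acc ++ l.map (fun i => if PySem.Int.mod i 4 = 0 then i * 10 else i) := by
  induction l generalizing acc with
  | nil => simp
  | cons x l ih =>
    simp only [List.foldl_cons, List.map_cons]
    split_ifs with h <;> rw [ih] <;> simp

-- Elementwise effect of the strided modify-fold (indices distinct and nonnegative).
theorem getElem?_foldl_modify (js : List Int) (hnd : js.Nodup) (hge : ∀ j ∈ js, 0 ≤ j)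
    (xs : List Int) (k : Nat) :
    (js.foldl (fun st j => st.modify j.toNat (· * 10)) xs)[k]? =
      (fun v => if (k : Int) ∈ js then v * 10 else v) <$> xs[k]? := by
  induction js generalizing xs with
  | nil => cases hx : xs[k]? <;> simp [hx]
  | cons j js ih =>
    obtain ⟨hj_notmem, hnd'⟩ := List.nodup_cons.mp hnd
    have hj0 : 0 ≤ j := hge j (List.mem_cons_self ..)
    have hjk : j.toNat = k ↔ (k : Int) = j := by omega
    rw [List.foldl_cons,
        ih hnd' (fun x hx => hge x (List.mem_cons_of_mem _ hx)) (xs.modify j.toNat (· * 10)),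
        List.getElem?_modify]
    cases hx : xs[k]? with
    | none => simp
    | some a =>
      by_cases hmem : (k : Int) ∈ js
      · have hne : ¬ j.toNat = k := fun h => hj_notmem (by rwa [hjk.mp h] at hmem)
        simp [hmem, hne]
      · by_cases hkj : (k : Int) = j
        · simp [hjk.mpr hkj, hkj, hj_notmem]
        · simp [hmem, hkj, hjk]

theorem nodup_pyRange_3_4 (n : Int) : (PySem.List.pyRange 3 n 4).Nodup := by
  rw [PySem.List.pyRange_of_pos _ _ (by norm_num)]
  exact (List.nodup_range).map (fun a b h => by omega)

-- ===== VERDICT (by name: the statement is the Claim_ definition above) =====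
theorem amplify_spec : Claim_equal_amplify := by
  intro n _
  show amplify n = amplify_alt n
  unfold amplify amplify_alt
  rw [foldl_amp_append]
  have hge : ∀ j ∈ PySem.List.pyRange 3 n 4, 0 ≤ j := by
    intro j hj
    have := (PySem.List.mem_pyRange_iff_of_pos (by norm_num) j).mp hj
    omega
  apply List.ext_getElem?
  intro k
  rw [List.nil_append, List.getElem?_map,
      getElem?_foldl_modify _ (nodup_pyRange_3_4 n) hge _ k]
  by_cases hk : k < (PySem.List.pyRange 1 (n + 1) 1).length
  · rw [List.getElem?_eq_getElem hk, PySem.List.getElem_pyRange_one _ _ _ hk]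
    have hklt : (k : Int) < n := by
      have := hk
      rw [PySem.List.length_pyRange_one] at this
      omega
    have hmem : ((k : Int) ∈ PySem.List.pyRange 3 n 4) ↔ (4 ∣ (1 + (k : Int))) := by
      rw [PySem.List.mem_pyRange_iff_of_pos (by norm_num)]
      omega
    by_cases hc : (4 : Int) ∣ (1 + (k : Int)) <;>
      simp [hmem, hc]
  · rw [List.getElem?_eq_none (by omega)]
    simp
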